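-- pv_equiv track=rewrite | github.com/vijayant-pandey-primotech/test | Rejara-AI-v2-dev/src/core/utils.py | split_user_response
-- ===== SOURCE A (Python) =====
-- from typing import List, Dict, Any, Optional
--
-- def split_user_response(user_response: str) -> List[str]:
--     """
--        Properly split the user response into key-value pairs
--        splitting just by comma can incorrectly split a key/value pair response that contains a comma; e.g.
--        "Joey=yes and Judith Brown, 212 555-1233 is the executor, Madison=yes"
--        -> {"joey": "yes and Judith Brown, 212 555-1233 is the executor", "madison": "yes"}
--     """
--     _user_response_for_extraction = {}
--     parts = [p.strip() for p in user_response.split(",")]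
--     i = 0
--     while i < len(parts):
--         part = parts[i]
--         if "=" in part and len(part.split("=", 1)) == 2:
--             # Found a key-value pair
--             key, value = part.split("=", 1)
--             key = key.strip().lower()
--             value = value.strip()
--
--             # Collect any following text until the next key-value pair
--             i += 1
--             while i < len(parts):
--                 next_part = parts[i]
--                 # If next part is a key-value pair, stop collecting
--                 if "=" in next_part and len(next_part.split("=", 1)) == 2:
--                     break
--                 # Otherwise, append to value
--                 value += ", " + next_part
--                 i += 1
--
--             _user_response_for_extraction[key] = value.strip()
--         else:
--             i += 1
--
--     return _user_response_for_extraction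
-- ===== SOURCE B (Python) =====
-- def split_user_response(user_response):
--     """Single flat pass: a current (key, value) pair is carried as state and
--     flushed into the dict when the next key=value fragment (or the end) arrives."""
--     result = {}
--     current = None  # (key, accumulated value) or None
--     for part in (p.strip() for p in user_response.split(",")):
--         if "=" in part:
--             if current is not None:
--                 result[current[0]] = current[1].strip()
--             key, value = part.split("=", 1)
--             current = (key.strip().lower(), value.strip())
--         elif current is not None:
--             current = (current[0], current[1] + ", " + part)
--     if current is not None:
--         result[current[0]] = current[1].strip()
--     return result
-- ===== Notes on version B (the rewrite author's own statement) =====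
-- stated objective: simpler
-- what changed: Replaces the index-driven outer while loop with an inner lookahead while by one flat pass over the fragments that carries the current (key, value) pair as state and flushes it when the next key=value fragment or the end of input arrives.
import Mathlib
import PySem

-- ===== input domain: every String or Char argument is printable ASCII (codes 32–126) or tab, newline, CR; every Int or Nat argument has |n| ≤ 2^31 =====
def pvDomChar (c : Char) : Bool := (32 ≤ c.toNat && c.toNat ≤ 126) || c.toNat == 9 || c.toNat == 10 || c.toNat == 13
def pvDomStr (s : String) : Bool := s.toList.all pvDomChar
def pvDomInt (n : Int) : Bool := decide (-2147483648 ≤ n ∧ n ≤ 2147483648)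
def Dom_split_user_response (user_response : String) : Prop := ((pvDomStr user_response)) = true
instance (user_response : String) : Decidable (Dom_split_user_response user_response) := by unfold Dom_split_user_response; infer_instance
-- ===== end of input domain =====

-- B replaces A's nested index-based while loops by one flat pass carrying the current (key, value) pair as state; same result, simpler structure.

-- ===== PORT A =====
-- part.split("=", 1), shared by both ports (both Pythons call exactly this)
def pvSplitEq (s : String) : List String := (PySem.Str.splitMax? s "=" 1).getD []

-- the inner lookahead while loop: collects following non-key-value parts into value,
-- returns the grown value and the remaining parts
def pvCollect (parts : List String) (value : String) : String × List String :=
  match parts with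
  | [] => (value, [])
  | p :: rest =>
    if PySem.Str.isIn "=" p && (pvSplitEq p).length == 2 then (value, p :: rest)
    else pvCollect rest (value ++ ", " ++ p)

theorem pvCollect_length (parts : List String) (value : String) :
    (pvCollect parts value).2.length ≤ parts.length := by
  induction parts generalizing value with
  | nil => simp [pvCollect]
  | cons p rest ih =>
    simp only [pvCollect]
    split
    · simp
    · exact le_trans (ih _) (by simp)

-- the outer while loop over the index i, as recursion on the remaining suffix
def pvLoopA (parts : List String) (d : PySem.Dict String String) : PySem.Dict String String :=
  match parts with
  | [] => d
  | part :: rest =>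
    if PySem.Str.isIn "=" part && (pvSplitEq part).length == 2 then
      let kv := pvSplitEq part
      let key := PySem.Str.lower (PySem.Str.strip (kv.headD ""))
      let value := PySem.Str.strip ((kv.drop 1).headD "")
      let res := pvCollect rest value
      pvLoopA res.2 (d.insert key (PySem.Str.strip res.1))
    else pvLoopA rest d
termination_by parts.length
decreasing_by
  · have h := pvCollect_length rest (PySem.Str.strip (((pvSplitEq part).drop 1).headD ""))
    simp only [List.length_cons]
    omega
  · simp

def split_user_response (user_response : String) : List (String × String) :=
  (pvLoopA (((PySem.Str.split? user_response ",").getD []).map PySem.Str.strip)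
    PySem.Dict.empty).items

-- ===== PORT B =====
-- store the carried (key, value) pair (stripping the value), if any
def pvFlush (d : PySem.Dict String String) (cur : Option (String × String)) :
    PySem.Dict String String :=
  match cur with
  | none => d
  | some (k, v) => d.insert k (PySem.Str.strip v)

-- the single flat for loop of B, carrying the current pair as state
def pvLoopB (parts : List String) (d : PySem.Dict String String)
    (cur : Option (String × String)) : PySem.Dict String String :=
  match parts with
  | [] => pvFlush d cur
  | p :: rest =>
    if PySem.Str.isIn "=" p then
      let kv := pvSplitEq p
      pvLoopB rest (pvFlush d cur)
        (some (PySem.Str.lower (PySem.Str.strip (kv.headD "")),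
               PySem.Str.strip ((kv.drop 1).headD "")))
    else
      match cur with
      | none => pvLoopB rest d none
      | some (k, v) => pvLoopB rest d (some (k, v ++ ", " ++ p))

def split_user_response_alt (user_response : String) : List (String × String) :=
  (pvLoopB (((PySem.Str.split? user_response ",").getD []).map PySem.Str.strip)
    PySem.Dict.empty none).items

-- ===== PRECONDITION & SPEC =====
def Spec_split_user_response (user_response : String) (out : List (String × String)) : Prop := out = split_user_response_alt user_response
instance (user_response : String) (out : List (String × String)) : Decidable (Spec_split_user_response user_response out) := by unfold Spec_split_user_response; infer_instance

-- ===== CLAIM (what is proved, stated in full; the proofs are below) =====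
def Claim_equal_split_user_response : Prop := ∀ (user_response : String), Dom_split_user_response user_response → Spec_split_user_response user_response (split_user_response user_response)

-- ===== LEMMAS AND PROOFS =====

-- splitOnMax.go with maxsplit exhausted returns the remainder as one piece
theorem pv_go_zero (sep : List Char) (fuel : Nat) (l cur : List Char)
    (acc : List (List Char)) :
    PySem.Chars.splitOnMax.go sep fuel 0 l cur acc = ((cur.reverse ++ l) :: acc).reverse := by
  cases fuel with
  | zero => rfl
  | succ f =>
    cases l with
    | nil => simp [PySem.Chars.splitOnMax.go]
    | cons c rest => simp [PySem.Chars.splitOnMax.go]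

-- with maxsplit = 1, the number of pieces is 2 iff the separator occurs
theorem pv_go_one (sep : List Char) (hsep : sep ≠ []) (fuel : Nat) (l cur : List Char)
    (acc : List (List Char)) (h : l.length < fuel) :
    (PySem.Chars.splitOnMax.go sep fuel 1 l cur acc).length =
      acc.length + (if PySem.Chars.isIn sep l then 2 else 1) := by
  induction fuel generalizing l cur acc with
  | zero => omega
  | succ f ih =>
    cases l with
    | nil =>
      have hnil : PySem.Chars.isIn sep ([] : List Char) = false := by
        rw [PySem.Chars.isIn_eq_false_iff]
        intro hc
        exact hsep (List.infix_nil.mp hc)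
      simp [PySem.Chars.splitOnMax.go, hnil]
    | cons c rest =>
      by_cases hp : sep.isPrefixOf (c :: rest)
      · have hin : PySem.Chars.isIn sep (c :: rest) = true := by
          rw [PySem.Chars.isIn_iff_infix]
          exact (List.isPrefixOf_iff_prefix.mp hp).isInfix
        simp only [PySem.Chars.splitOnMax.go, hp, if_true, hin]
        rw [pv_go_zero]
        simp
      · have hin : PySem.Chars.isIn sep (c :: rest) = PySem.Chars.isIn sep rest := by
          rw [Bool.eq_iff_iff]
          rw [PySem.Chars.isIn_iff_infix, PySem.Chars.isIn_iff_infix, List.infix_cons_iff]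
          constructor
          · rintro (hpre | hinf)
            · exact absurd (List.isPrefixOf_iff_prefix.mpr hpre) hp
            · exact hinf
          · exact Or.inr
        simp only [PySem.Chars.splitOnMax.go, hp, hin]
        rw [if_neg (by decide), if_neg (by decide)]
        have hlt : rest.length < f := by simp at h; omega
        rw [ih rest (c :: cur) acc hlt]

-- A's branch condition equals B's: when "=" occurs, split("=", 1) has exactly 2 pieces
theorem pv_cond_eq (p : String) :
    (PySem.Str.isIn "=" p && (pvSplitEq p).length == 2) = PySem.Str.isIn "=" p := by
  cases h : PySem.Str.isIn "=" p with
  | false => simp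
  | true =>
    simp only [Bool.true_and, beq_iff_eq]
    have hin : PySem.Chars.isIn "=".toList p.toList = true := by
      have heq := PySem.Str.isIn_eq "=" p
      rw [← heq, h]
    have hlen : (PySem.Chars.splitOnMax p.toList "=".toList 1).length = 2 := by
      have hgo := pv_go_one "=".toList (by decide) (p.toList.length + 1) p.toList [] []
        (by omega)
      rw [PySem.Chars.splitOnMax, if_neg (by decide)]
      have h1 : Int.toNat 1 = 1 := rfl
      rw [h1, hgo, hin]
      simp
    have hchar : ("=" : String).toList = ['='] := rfl
    rw [hchar] at hlen
    rw [pvSplitEq, PySem.Str.splitMax?, PySem.Chars.splitMax?, if_neg (by decide)]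
    simp [hlen]

-- B with a carried pair equals A's collect-then-recurse
theorem pv_loopB_some (parts : List String) (k v : String) (d : PySem.Dict String String) :
    pvLoopB parts d (some (k, v)) =
      pvLoopA (pvCollect parts v).2
        (d.insert k (PySem.Str.strip (pvCollect parts v).1)) := by
  induction parts generalizing k v d with
  | nil => simp [pvLoopB, pvFlush, pvCollect, pvLoopA]
  | cons p rest ih =>
    by_cases hp : PySem.Str.isIn "=" p
    · have hc : (PySem.Str.isIn "=" p && (pvSplitEq p).length == 2) = true := by
        rw [pv_cond_eq, hp]
      rw [pvCollect, if_pos hc]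
      rw [pvLoopA, if_pos hc]
      rw [pvLoopB, if_pos hp]
      simp only [pvFlush]
      exact ih _ _ _
    · have hc : (PySem.Str.isIn "=" p && (pvSplitEq p).length == 2) = false := by
        rw [pv_cond_eq]
        simpa using hp
      rw [pvCollect, if_neg (by rw [hc]; simp)]
      rw [pvLoopB, if_neg hp]
      exact ih _ _ _

-- B starting with no carried pair equals A's outer loop
theorem pv_loop_eq (parts : List String) (d : PySem.Dict String String) :
    pvLoopA parts d = pvLoopB parts d none := by
  induction parts generalizing d with
  | nil => simp [pvLoopA, pvLoopB, pvFlush]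
  | cons p rest ih =>
    by_cases hp : PySem.Str.isIn "=" p
    · have hc : (PySem.Str.isIn "=" p && (pvSplitEq p).length == 2) = true := by
        rw [pv_cond_eq, hp]
      rw [pvLoopA, if_pos hc]
      rw [pvLoopB, if_pos hp]
      simp only [pvFlush]
      exact (pv_loopB_some rest _ _ d).symm
    · have hc : (PySem.Str.isIn "=" p && (pvSplitEq p).length == 2) = false := by
        rw [pv_cond_eq]
        simpa using hp
      rw [pvLoopA, if_neg (by rw [hc]; simp)]
      rw [pvLoopB, if_neg hp]
      exact ih d

-- ===== VERDICT (by name: the statement is the Claim_ definition above) =====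
theorem split_user_response_spec : Claim_equal_split_user_response := by
  intro s _
  unfold Spec_split_user_response split_user_response split_user_response_alt
  rw [pv_loop_eq]
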